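-- pv_equiv track=rewrite | github.com/niufir/lingtrain-aligner-cmd | src/AlignerImproved/ParagraphMaker.py | checkIfRomanNumeral
-- ===== SOURCE A (Python) =====
-- def checkIfRomanNumeral(numeral:str):
--     """Controls that the userinput only contains valid roman numerals"""
--     if len(numeral ) ==0:
--         return False
--     numeral = numeral.upper()
--     validRomanNumerals = ["M", "D", "C", "L", "X", "V", "I", "(", ")"]
--     valid = True
--     for letters in numeral:
--         if letters not in validRomanNumerals:
--             valid = False
--             break
--     return valid
-- ===== SOURCE B (Python) =====
-- def checkIfRomanNumeral(numeral: str):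
--     """Controls that the userinput only contains valid roman numerals"""
--     chars = list(numeral.upper())
--     total = sum(chars.count(c) for c in "MDCLXVI()")
--     return len(chars) > 0 and total == len(chars)
-- ===== Notes on version B (the rewrite author's own statement) =====
-- stated objective: alternative
-- what changed: Instead of scanning the input and testing each character for membership (with a flag and break), B iterates over the fixed 9-character roman alphabet, counts how often each allowed character occurs in the uppercased input, and returns whether those counts sum to the input's length (and the input is nonempty); since the allowed characters are distinct, the counts sum to the length exactly when every character is allowed.
import Mathlib
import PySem

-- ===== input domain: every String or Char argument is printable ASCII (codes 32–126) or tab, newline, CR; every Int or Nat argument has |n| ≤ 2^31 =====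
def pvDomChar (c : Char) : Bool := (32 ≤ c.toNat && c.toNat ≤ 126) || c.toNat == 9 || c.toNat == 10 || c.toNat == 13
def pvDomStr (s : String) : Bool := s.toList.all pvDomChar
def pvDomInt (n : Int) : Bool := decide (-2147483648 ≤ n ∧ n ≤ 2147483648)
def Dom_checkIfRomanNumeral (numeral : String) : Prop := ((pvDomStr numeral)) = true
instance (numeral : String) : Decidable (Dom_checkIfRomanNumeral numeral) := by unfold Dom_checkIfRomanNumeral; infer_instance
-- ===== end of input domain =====

-- B iterates over the fixed 9-character roman alphabet, summing each character's
-- occurrence count in the uppercased input, and returns (nonempty and sum = length);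
-- A scans the input testing each character for membership with a flag and break (alternative).


-- ===== PORT A =====
-- validRomanNumerals = ["M","D","C","L","X","V","I","(",")"] (one-char strings, ported as chars)
def pvValidRomanNumerals : List Char := ['M', 'D', 'C', 'L', 'X', 'V', 'I', '(', ')']

-- the for-loop with `valid = False; break`: first offending char ends the loop with False
def pvLoopA : List Char → Bool
  | [] => true
  | c :: rest => if ¬ pvValidRomanNumerals.contains c then false else pvLoopA rest

def checkIfRomanNumeral (numeral : String) : Bool :=
  if PySem.Str.len numeral = 0 then false
  else pvLoopA (PySem.Str.upper numeral).toList

-- ===== PORT B =====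
-- the string "MDCLXVI()" iterated character by character
def pvAlphabet : List Char := "MDCLXVI()".toList

def checkIfRomanNumeral_alt (numeral : String) : Bool :=
  let chars := (PySem.Str.upper numeral).toList           -- chars = list(numeral.upper())
  let total := (pvAlphabet.map (fun c => PySem.List.count chars c)).sum  -- sum(chars.count(c) for c in "MDCLXVI()")
  decide (0 < chars.length) && decide (total = chars.length)            -- len(chars) > 0 and total == len(chars)

-- ===== PRECONDITION & SPEC =====
def Spec_checkIfRomanNumeral (numeral : String) (out : Bool) : Prop := out = checkIfRomanNumeral_alt numeral
instance (numeral : String) (out : Bool) : Decidable (Spec_checkIfRomanNumeral numeral out) := by unfold Spec_checkIfRomanNumeral; infer_instance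

-- ===== CLAIM (what is proved, stated in full; the proofs are below) =====
def Claim_equal_checkIfRomanNumeral : Prop := ∀ (numeral : String), Dom_checkIfRomanNumeral numeral → Spec_checkIfRomanNumeral numeral (checkIfRomanNumeral numeral)

-- ===== LEMMAS AND PROOFS =====
-- A's loop is the 'all characters allowed' predicate
theorem pvLoopA_eq_all (cs : List Char) :
    pvLoopA cs = cs.all (fun c => pvValidRomanNumerals.contains c) := by
  induction cs with
  | nil => rfl
  | cons c rest ih =>
    simp only [pvLoopA, List.all_cons]
    by_cases h : pvValidRomanNumerals.contains c = true <;> simp [ih]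

-- the alphabet's characters are distinct, so a character contributes 1 to the count sum iff it is allowed
theorem pvAlphabet_count (x : Char) :
    pvAlphabet.count x = if pvAlphabet.contains x then 1 else 0 := by
  by_cases h : x ∈ pvAlphabet
  · simp [List.count_eq_one_of_mem (by decide) h, h]
  · simp [List.count_eq_zero_of_not_mem h, h]

-- B's count sum is the number of allowed characters of the input
theorem pv_sum_counts (cs : List Char) :
    (pvAlphabet.map (fun c => PySem.List.count cs c)).sum
      = (cs.filter (fun x => pvAlphabet.contains x)).length := by
  induction cs with
  | nil => simp [PySem.List.count]
  | cons x cs ih =>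
    have hsplit : (pvAlphabet.map (fun c => PySem.List.count (x :: cs) c)).sum
        = (pvAlphabet.map (fun c => PySem.List.count cs c)).sum + pvAlphabet.count x := by
      simp only [PySem.List.count, List.count_cons]
      induction pvAlphabet with
      | nil => simp
      | cons a al ihal =>
        simp only [List.map_cons, List.sum_cons, List.count_cons, ihal]
        by_cases hax : x = a
        · simp [hax]; omega
        · simp [hax, Ne.symm hax, beq_iff_eq]; omega
    rw [hsplit, ih, pvAlphabet_count]
    by_cases hx : x ∈ pvAlphabet <;> simp [hx]
-- B equals 'all characters allowed' on nonempty input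
theorem pv_alt_eq_all (cs : List Char) (h : cs ≠ []) :
    (decide (0 < cs.length)
        && decide ((pvAlphabet.map (fun c => PySem.List.count cs c)).sum = cs.length))
      = cs.all (fun c => pvValidRomanNumerals.contains c) := by
  have hlen : 0 < cs.length := List.length_pos_iff.mpr h
  rw [pv_sum_counts]
  simp only [hlen, decide_true, Bool.true_and]
  rw [Bool.eq_iff_iff, decide_eq_true_iff, List.all_eq_true]
  constructor
  · intro hfull c hc
    have := (List.length_filter_eq_length_iff).mp hfull c hc
    simpa [pvValidRomanNumerals, pvAlphabet] using this
  · intro hall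
    apply (List.length_filter_eq_length_iff).mpr
    intro c hc
    have := hall c hc
    simpa [pvValidRomanNumerals, pvAlphabet] using this

-- ===== VERDICT (by name: the statement is the Claim_ definition above) =====
theorem checkIfRomanNumeral_spec : Claim_equal_checkIfRomanNumeral := by
  intro numeral _
  unfold Spec_checkIfRomanNumeral checkIfRomanNumeral checkIfRomanNumeral_alt
  dsimp only
  by_cases h : PySem.Str.len numeral = 0
  · have hnil : numeral.toList = [] := by
      apply List.eq_nil_of_length_eq_zero
      rw [PySem.Str.len_eq] at h
      exact_mod_cast h
    have hup : (PySem.Str.upper numeral).toList = [] := by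
      rw [PySem.Str.toList_upper, hnil]; rfl
    rw [if_pos h, hup]
    have hd : decide (0 < ([] : List Char).length) = false := by decide
    rw [hd, Bool.false_and]
  · have hne : (PySem.Str.upper numeral).toList ≠ [] := by
      rw [PySem.Str.toList_upper, PySem.Chars.upper]
      simp only [ne_eq, List.map_eq_nil_iff]
      intro hc
      apply h
      have hl : numeral.toList.length = 0 := by rw [hc]; rfl
      rw [PySem.Str.len_eq, hl]
      rfl
    rw [if_neg h, pvLoopA_eq_all]
    exact (pv_alt_eq_all _ hne).symm
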